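-- pv_equiv track=rewrite | github.com/KirstenSotelo/RandomProjects | LeetCodePlayground/LeetCodePlayground.py | longestCommonPrefixFail
-- ===== SOURCE A (Python) =====
-- def longestCommonPrefixFail(strs): # This question is so ambiguous
--     """
--     :type strs: List[str]
--     :rtype: str
--     """
--
--     # Handle edge case where strs is empty
--     if not strs:
--         return ""
--
--     # Handle edge case where strs contains only one string
--     if len(strs) == 1:
--         return strs[0]
--
--     tempStr = ""
--     tempDic = {}
--
--     for strings in strs:
--         for char in strings:
--             if char not in "aeiou":  # If it's not a vowel (you can keep this condition if you want to exclude vowels)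
--                 tempStr += char
--             elif tempStr in tempDic.keys():
--                 tempDic[tempStr] = tempDic[tempStr] + 1
--                 tempStr = ""
--                 break
--             else:
--                 tempDic[tempStr] = 1
--                 tempStr = ""
--                 break
--
--     # Find the prefix with the maximum frequency in the dictionary
--     if tempDic:
--         longest = max(tempDic, key=tempDic.get)
--     else:
--         return ""
--
--     if tempDic[longest] == 1:
--         return ""
--
--     return longest
-- ===== SOURCE B (Python) =====
-- from collections import Counter
--
-- def longestCommonPrefixFail(strs):
--     if not strs:
--         return ""
--     if len(strs) == 1:
--         return strs[0]
--     carry = ""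
--     runs = []
--     for s in strs:
--         i = next((i for i, c in enumerate(s) if c in "aeiou"), None)
--         if i is None:
--             carry += s
--         else:
--             runs.append(carry + s[:i])
--             carry = ""
--     if not runs:
--         return ""
--     counts = Counter(runs)
--     best = max(counts, key=counts.get)
--     return "" if counts[best] == 1 else best
-- ===== Notes on version B (the rewrite author's own statement) =====
-- stated objective: simpler
-- what changed: A interleaves a char-by-char scan with mutable carry-string and dict-counting state in one nested loop; B first collects the list of consonant runs (jumping to each string's first vowel and slicing), then counts them with a Counter and takes the max in a separate phase.
import Mathlib
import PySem

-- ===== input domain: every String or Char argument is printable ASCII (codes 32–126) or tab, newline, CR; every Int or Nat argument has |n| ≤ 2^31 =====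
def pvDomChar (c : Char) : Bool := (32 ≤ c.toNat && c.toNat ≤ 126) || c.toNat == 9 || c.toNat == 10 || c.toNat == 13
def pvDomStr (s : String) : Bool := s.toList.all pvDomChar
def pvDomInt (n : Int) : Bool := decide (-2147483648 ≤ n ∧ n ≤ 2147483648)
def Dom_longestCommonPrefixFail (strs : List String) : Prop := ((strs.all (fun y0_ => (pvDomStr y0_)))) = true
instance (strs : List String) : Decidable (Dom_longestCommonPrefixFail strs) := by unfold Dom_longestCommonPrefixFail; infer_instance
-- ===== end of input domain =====

-- B restructures A's char-by-char stateful scan into: collect the consonant-run list first,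
-- then count it with a Counter (objective: simpler decomposition, same cost).

-- ===== PORT A =====
-- `char in "aeiou"` (shared by both Pythons)
def pvVowel (c : Char) : Bool := c == 'a' || c == 'e' || c == 'i' || c == 'o' || c == 'u'

-- A's inner `for char in strings` loop with its `break`; state = (tempStr, tempDic)
def pvScanA (cs : List Char) (t : List Char) (d : PySem.Dict (List Char) Int) :
    List Char × PySem.Dict (List Char) Int :=
  match cs with
  | [] => (t, d)
  | c :: rest =>
    if !pvVowel c then pvScanA rest (t ++ [c]) d
    else if d.contains t then ([], d.insert t (d.getD t 0 + 1))
    else ([], d.insert t 1)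

def longestCommonPrefixFail (strs : List String) : String :=
  if strs = [] then ""
  else if strs.length = 1 then strs.headD ""
  else
    let st := strs.foldl (fun st s => pvScanA s.toList st.1 st.2)
      (([] : List Char), (PySem.Dict.empty : PySem.Dict (List Char) Int))
    -- `max(tempDic, key=tempDic.get)`; `none` is exactly Python's `if tempDic:` being false → return ""
    match PySem.List.max? st.2.keys (fun k => st.2.getD k 0) with
    | none => ""
    | some longest => if st.2.getD longest 0 = 1 then "" else String.ofList longest

-- ===== PORT B =====
-- one step of B's loop: first-vowel index via findIdx? (= next(... enumerate ...)); state = (runs, carry)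
def pvStepB (st : List (List Char) × List Char) (s : String) : List (List Char) × List Char :=
  match s.toList.findIdx? pvVowel with
  | none => (st.1, st.2 ++ s.toList)
  | some i => (st.1 ++ [st.2 ++ s.toList.take i], [])

def longestCommonPrefixFail_alt (strs : List String) : String :=
  if strs = [] then ""
  else if strs.length = 1 then strs.headD ""
  else
    let st := strs.foldl pvStepB ([], [])
    if st.1 = [] then ""
    else
      let counts := PySem.Dict.counter st.1
      match PySem.List.max? counts.keys (fun k => counts.getD k 0) with
      | none => ""   -- unreachable guard (counts of a nonempty list); keeps the match total
      | some best => if counts.getD best 0 = 1 then "" else String.ofList best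

-- ===== PRECONDITION & SPEC =====
def Spec_longestCommonPrefixFail (strs : List String) (out : String) : Prop := out = longestCommonPrefixFail_alt strs
instance (strs : List String) (out : String) : Decidable (Spec_longestCommonPrefixFail strs out) := by unfold Spec_longestCommonPrefixFail; infer_instance

-- ===== CLAIM (what is proved, stated in full; the proofs are below) =====
def Claim_equal_longestCommonPrefixFail : Prop := ∀ (strs : List String), Dom_longestCommonPrefixFail strs → Spec_longestCommonPrefixFail strs (longestCommonPrefixFail strs)

-- ===== LEMMAS AND PROOFS =====

-- A's two record branches are one Counter-style insert
theorem pvCstep_eq (d : PySem.Dict (List Char) Int) (t : List Char) :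
    (if d.contains t then (([] : List Char), d.insert t (d.getD t 0 + 1))
     else ([], d.insert t 1))
      = ([], d.insert t (d.getD t 0 + 1)) := by
  by_cases h : d.contains t = true
  · simp [h]
  · simp only [Bool.not_eq_true] at h
    simp [h, PySem.Dict.getD_of_not_contains d 0 h]

-- A's inner scan, characterised by the first vowel position
theorem pvScanA_eq (cs t : List Char) (d : PySem.Dict (List Char) Int) :
    pvScanA cs t d =
      match cs.findIdx? pvVowel with
      | none => (t ++ cs, d)
      | some i => ([], (d.insert (t ++ cs.take i) ((d.getD (t ++ cs.take i) 0) + 1))) := by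
  induction cs generalizing t with
  | nil => simp [pvScanA]
  | cons c rest ih =>
    by_cases hv : pvVowel c = true
    · simp [pvScanA, hv, List.findIdx?_cons, pvCstep_eq]
    · simp only [Bool.not_eq_true] at hv
      rw [pvScanA]
      simp only [hv, Bool.not_false, if_true, ih, List.findIdx?_cons, Bool.false_eq_true,
        if_false]
      cases hfind : rest.findIdx? pvVowel with
      | none => simp
      | some i => simp [List.take_succ_cons]

-- B's fold with a nonempty runs accumulator just prefixes the accumulator
theorem pvStepB_acc (ss : List String) (rs : List (List Char)) (c : List Char) :
    ss.foldl pvStepB (rs, c)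
      = (rs ++ (ss.foldl pvStepB ([], c)).1, (ss.foldl pvStepB ([], c)).2) := by
  induction ss generalizing rs c with
  | nil => simp
  | cons s ss ih =>
    simp only [List.foldl_cons]
    rw [pvStepB, pvStepB]
    cases hfind : s.toList.findIdx? pvVowel with
    | none => simpa using ih rs (c ++ s.toList)
    | some i =>
      simp only [List.nil_append]
      rw [ih (rs ++ [c ++ s.toList.take i]) [], ih [c ++ s.toList.take i] []]
      simp

-- the main correspondence: A's stateful fold = B's run collection + Counter-style fold
theorem pvFold_eq (ss : List String) (t : List Char) (d : PySem.Dict (List Char) Int) :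
    ss.foldl (fun st s => pvScanA s.toList st.1 st.2) (t, d)
      = ((ss.foldl pvStepB ([], t)).2,
         (ss.foldl pvStepB ([], t)).1.foldl (fun d k => d.insert k (d.getD k 0 + 1)) d) := by
  induction ss generalizing t d with
  | nil => simp
  | cons s ss ih =>
    simp only [List.foldl_cons]
    rw [pvScanA_eq, pvStepB]
    cases hfind : s.toList.findIdx? pvVowel with
    | none => simpa using ih (t ++ s.toList) d
    | some i =>
      simp only [List.nil_append]
      rw [ih [] _, pvStepB_acc ss [t ++ s.toList.take i] []]
      simp

-- ===== VERDICT (by name: the statement is the Claim_ definition above) =====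
theorem longestCommonPrefixFail_spec : Claim_equal_longestCommonPrefixFail := by
  intro strs _
  unfold Spec_longestCommonPrefixFail longestCommonPrefixFail longestCommonPrefixFail_alt
  by_cases h0 : strs = []
  · simp [h0]
  · simp only [h0, if_false]
    by_cases h1 : strs.length = 1
    · simp [h1]
    · simp only [h1, if_false]
      rw [pvFold_eq]
      set runs := (strs.foldl pvStepB ([], [])).1 with hruns
      rw [show (runs.foldl (fun d k => d.insert k (d.getD k 0 + 1)) PySem.Dict.empty)
            = PySem.Dict.counter runs from
          PySem.Dict.foldl_insert_getD_add_one_eq_counter runs]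
      by_cases hr : runs = []
      · simp [hr, PySem.Dict.counter, PySem.List.max?]
      · simp [hr]
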